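-- pv_equiv track=rewrite | github.com/JakubGonera/Gonera-Classwork | pin/simple_pin.py | gen_perm
-- ===== SOURCE A (Python) =====
-- def is_in_list(l, c):
--     for x in l:
--         if c == x:
--             return True
--         #end if
--     #next
--
--     return False
--
-- def gen_perm(list_of_chars, n):
--     out = []
--     if n == 1:
--         for c in list_of_chars:
--             out.append([c])
--         #next
--         return out
--     #end if
--     last_list = gen_perm(list_of_chars, n - 1)
--     for c in list_of_chars:
--         for l in last_list:
--             if is_in_list(l, c) == False:
--                 out.append([c] + l)
--             #end if
--         #next
--     #next
--     return out
-- ===== SOURCE B (Python) =====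
-- def gen_perm(list_of_chars, n):
--     base = [[c] for c in list_of_chars]
--     for _ in range(2, n + 1):
--         base = [[c] + l for c in list_of_chars for l in base if c not in l]
--     return base
-- ===== Notes on version B (the rewrite author's own statement) =====
-- stated objective: simpler
-- what changed: Replaces recursion on n (with a separate hand-written membership helper) by an iterative bottom-up build: seed the length-1 lists and repeat the extension step n-1 times with a comprehension.
import Mathlib
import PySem

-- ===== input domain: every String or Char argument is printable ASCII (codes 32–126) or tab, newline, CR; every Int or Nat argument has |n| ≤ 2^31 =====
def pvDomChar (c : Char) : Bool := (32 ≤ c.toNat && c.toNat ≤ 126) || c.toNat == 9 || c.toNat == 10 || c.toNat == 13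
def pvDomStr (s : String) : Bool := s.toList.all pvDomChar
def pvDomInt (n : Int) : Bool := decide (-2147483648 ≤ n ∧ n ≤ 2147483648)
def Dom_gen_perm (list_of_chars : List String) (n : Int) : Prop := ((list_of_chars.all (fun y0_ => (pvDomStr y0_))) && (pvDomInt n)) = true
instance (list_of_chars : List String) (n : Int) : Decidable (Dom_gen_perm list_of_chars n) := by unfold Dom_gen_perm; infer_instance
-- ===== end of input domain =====

-- B replaces A's recursion on n by an iterative bottom-up build (seed length-1 lists,
-- repeat the extension step n-1 times); return values agree for all n ≥ 1.

-- ===== PORT A =====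
-- helper is_in_list, literal transliteration
def is_in_list (l : List String) (c : String) : Bool :=
  match l with
  | [] => false
  | x :: xs => if c == x then true else is_in_list xs c

-- A's recursion, on the Nat value of n (A recurses on n-1 down to the base case n == 1;
-- the 0 case is never reached for n ≥ 1)
def genPermA (list_of_chars : List String) : Nat → List (List String)
  | 0 => []
  | 1 => list_of_chars.foldl (fun out c => out ++ [[c]]) []
  | k + 2 =>
    let last_list := genPermA list_of_chars (k + 1)
    list_of_chars.foldl (fun out c =>
      last_list.foldl (fun out l =>
        if is_in_list l c == false then out ++ [c :: l] else out) out) []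

-- for n ≤ 0 the Python recurses without bound (RecursionError): outside Pre_, guard for totality
def gen_perm (list_of_chars : List String) (n : Int) : List (List String) :=
  if n ≤ 0 then [] else genPermA list_of_chars n.toNat

-- ===== PORT B =====
-- one extension step: [[c] + l for c in cs for l in base if c not in l]
def genPermStep (cs : List String) (base : List (List String)) : List (List String) :=
  cs.flatMap (fun c => (base.filter (fun l => !(l.contains c))).map (fun l => c :: l))

def gen_perm_alt (list_of_chars : List String) (n : Int) : List (List String) :=
  (PySem.List.pyRange 2 (n + 1) 1).foldl (fun base _ => genPermStep list_of_chars base)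
    (list_of_chars.map (fun c => [c]))

-- ===== PRECONDITION & SPEC =====
-- Pre_ excludes n ≤ 0, where Python A recurses without bound and raises RecursionError
def Pre_gen_perm (list_of_chars : List String) (n : Int) : Prop := 1 ≤ n
instance (list_of_chars : List String) (n : Int) : Decidable (Pre_gen_perm list_of_chars n) := by unfold Pre_gen_perm; infer_instance
def pvWitness_gen_perm : List String × Int := (["a", "b"], 2)

def Spec_gen_perm (list_of_chars : List String) (n : Int) (out : List (List String)) : Prop := out = gen_perm_alt list_of_chars n
instance (list_of_chars : List String) (n : Int) (out : List (List String)) : Decidable (Spec_gen_perm list_of_chars n out) := by unfold Spec_gen_perm; infer_instance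

-- ===== CLAIM (what is proved, stated in full; the proofs are below) =====
def Claim_equal_gen_perm : Prop := ∀ (list_of_chars : List String) (n : Int), Dom_gen_perm list_of_chars n → Pre_gen_perm list_of_chars n → Spec_gen_perm list_of_chars n (gen_perm list_of_chars n)

-- ===== LEMMAS AND PROOFS =====

theorem is_in_list_eq_contains (l : List String) (c : String) :
    is_in_list l c = l.contains c := by
  induction l with
  | nil => rfl
  | cons x xs ih =>
    simp only [is_in_list, List.contains_cons, ih]
    by_cases h : c == x <;> simp [h]

theorem inner_foldl (c : String) (b : List (List String)) (acc : List (List String)) :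
    b.foldl (fun out l => if is_in_list l c == false then out ++ [c :: l] else out) acc
      = acc ++ (b.filter (fun l => !(l.contains c))).map (fun l => c :: l) := by
  induction b generalizing acc with
  | nil => simp
  | cons l b ih =>
    rw [List.foldl_cons, List.filter_cons]
    cases hc : l.contains c
    · have hg : (is_in_list l c == false) = true := by
        rw [is_in_list_eq_contains, hc]; rfl
      rw [if_pos hg, ih]
      simp
    · have hg : ¬ ((is_in_list l c == false) = true) := by
        rw [is_in_list_eq_contains, hc]; simp
      rw [if_neg hg, ih]
      simp

theorem outer_foldl {α : Type} (cs : List α) (g : α → List (List String))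
    (acc : List (List String)) :
    cs.foldl (fun out c => out ++ g c) acc = acc ++ cs.flatMap g := by
  induction cs generalizing acc with
  | nil => simp
  | cons c cs ih => simp [ih]

theorem genPermA_base (cs : List String) :
    genPermA cs 1 = cs.map (fun c => [c]) := by
  show cs.foldl (fun out c => out ++ [[c]]) [] = _
  rw [outer_foldl]
  simp only [List.nil_append]
  induction cs with
  | nil => rfl
  | cons c cs ih => simp [ih]

theorem genPermA_step (cs : List String) (k : ℕ) :
    genPermA cs (k + 2) = genPermStep cs (genPermA cs (k + 1)) := by
  simp only [genPermA, genPermStep, inner_foldl]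
  rw [outer_foldl]
  simp

theorem genPermA_iterate (cs : List String) (k : ℕ) :
    genPermA cs (k + 1) = (genPermStep cs)^[k] (cs.map (fun c => [c])) := by
  induction k with
  | zero => simpa using genPermA_base cs
  | succ k ih =>
    rw [show k + 1 + 1 = k + 2 from rfl, genPermA_step, ih,
      Function.iterate_succ_apply']

theorem foldl_const_iterate (cs : List String) (r : List Int) (b : List (List String)) :
    r.foldl (fun base _ => genPermStep cs base) b = (genPermStep cs)^[r.length] b := by
  induction r generalizing b with
  | nil => rfl
  | cons x r ih => simp [ih, Function.iterate_succ_apply]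

-- ===== VERDICT (by name: the statement is the Claim_ definition above) =====
theorem gen_perm_spec : Claim_equal_gen_perm := by
  intro cs n _ hpre
  unfold Spec_gen_perm gen_perm gen_perm_alt
  have h1 : ¬ n ≤ 0 := by unfold Pre_gen_perm at hpre; omega
  have hk : n.toNat = (n - 1).toNat + 1 := by omega
  rw [if_neg h1, hk, genPermA_iterate, foldl_const_iterate,
    PySem.List.length_pyRange_one]
  congr 1
  omega
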